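-- pv_equiv track=rewrite | github.com/kevingamez/Dalgo-2022-1 | ProyectoP2/ProblemaP2.py | implementation
-- ===== SOURCE A (Python) =====
-- def implementation(array):
--   maximun = array[0]
--   array_max = []
--   for x in array:
--     if x > maximun:
--       maximun = x
--     array_max.append(maximun)
--   minimum = array[-1]
--   array_min = []
--   for x in reversed(array):
--     if x < minimum:
--       minimum = x
--     array_min.append(minimum)
--   array_min = list(reversed(array_min))
--   i=0
--   j=0
--   k=0
--   while i < len(array) and j < len(array):
--     if array_max[i] >= array_min[j]:
--       if i >= j:
--         k += 1
--       j+=1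
--     else:
--       i += 1
--   return k
-- ===== SOURCE B (Python) =====
-- def implementation(array):
--     m = array[-1]
--     rev_mins = []
--     for x in reversed(array):
--         if x < m:
--             m = x
--         rev_mins.append(m)
--     suffix_min = rev_mins[::-1]
--     count = 1
--     prefix_max = array[0]
--     for j in range(1, len(array)):
--         if prefix_max < suffix_min[j]:
--             count += 1
--         if array[j] > prefix_max:
--             prefix_max = array[j]
--     return count
-- ===== Notes on version B (the rewrite author's own statement) =====
-- stated objective: simpler
-- what changed: Replaces A's two-pointer merge over the prefix-max and suffix-min arrays (and the prefix-max array itself) by a single forward pass keeping a running prefix maximum and counting split points where it is below the suffix minimum, starting the counter at 1.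
import Mathlib
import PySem

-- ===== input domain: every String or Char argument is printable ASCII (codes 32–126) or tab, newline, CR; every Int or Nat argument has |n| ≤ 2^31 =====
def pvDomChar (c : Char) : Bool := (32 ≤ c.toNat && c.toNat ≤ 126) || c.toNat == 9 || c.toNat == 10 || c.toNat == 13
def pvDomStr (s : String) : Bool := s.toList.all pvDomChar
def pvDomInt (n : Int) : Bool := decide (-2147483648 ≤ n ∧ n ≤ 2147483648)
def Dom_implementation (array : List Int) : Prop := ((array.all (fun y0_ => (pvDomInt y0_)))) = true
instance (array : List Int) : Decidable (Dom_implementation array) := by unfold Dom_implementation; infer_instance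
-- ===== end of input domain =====

-- B replaces A's two-pointer merge of the prefix-max/suffix-min arrays by a single
-- forward pass with a running prefix maximum counting split points (objective: simpler).


-- ===== PORT A =====
-- 'for x in array: if x > maximun: maximun = x; array_max.append(maximun)'
def buildMax (m : Int) : List Int → List Int
  | [] => []
  | x :: xs => let m' := if x > m then x else m; m' :: buildMax m' xs

-- 'for x in reversed(array): if x < minimum: minimum = x; array_min.append(minimum)'
-- (shared verbatim by A and B: B's Python contains the identical loop)
def buildMin (m : Int) : List Int → List Int
  | [] => []
  | x :: xs => let m' := if x < m then x else m; m' :: buildMin m' xs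

-- the 'while i < len(array) and j < len(array)' two-pointer loop; the Python indices
-- i, j are nonnegative and in range here, so getD is exact for array_max[i]/array_min[j]
-- (fuel is a totality guard only: the loop makes at most 2*n steps and the caller
-- passes fuel 2*n+1, so the fuel is never exhausted on the executed iterations)
def loopA (pmax pmin : List Int) (fuel n i j : Nat) (k : Int) : Int :=
  match fuel with
  | 0 => k
  | fuel + 1 =>
    if i < n ∧ j < n then
      if pmax.getD i 0 ≥ pmin.getD j 0 then
        loopA pmax pmin fuel n i (j + 1) (if i ≥ j then k + 1 else k)
      else
        loopA pmax pmin fuel n (i + 1) j k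
    else k

def implementation (array : List Int) : Int :=
  let maximun := (PySem.List.pyGet? array 0).getD 0      -- array[0]; none (IndexError) excluded by Pre_
  let array_max := buildMax maximun array
  let minimum := (PySem.List.pyGet? array (-1)).getD 0   -- array[-1]
  let array_min := (buildMin minimum array.reverse).reverse
  loopA array_max array_min (array.length + array.length + 1) array.length 0 0 0

-- ===== PORT B =====
-- 'for j in range(1, len(array)): if prefix_max < suffix_min[j]: count += 1; if array[j] > prefix_max: …'
-- (indices j are in range, so getD is exact)
-- (fuel is a totality guard only: the loop makes n - 1 steps and the caller passes fuel n)
def countLoop (array sufmin : List Int) (fuel n j : Nat) (pm k : Int) : Int :=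
  match fuel with
  | 0 => k
  | fuel + 1 =>
    if j < n then
      countLoop array sufmin fuel n (j + 1)
        (if array.getD j 0 > pm then array.getD j 0 else pm)
        (if pm < sufmin.getD j 0 then k + 1 else k)
    else k

def implementation_alt (array : List Int) : Int :=
  let m := (PySem.List.pyGet? array (-1)).getD 0         -- array[-1]; IndexError excluded by Pre_
  let suffix_min := (buildMin m array.reverse).reverse
  countLoop array suffix_min array.length array.length 1 ((PySem.List.pyGet? array 0).getD 0) 1

-- ===== PRECONDITION & SPEC =====
-- A raises IndexError on the empty list (array[0]); B raises there too (array[-1]).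
def Pre_implementation (array : List Int) : Prop := array ≠ []
instance (array : List Int) : Decidable (Pre_implementation array) := by unfold Pre_implementation; infer_instance
def pvWitness_implementation : List Int := [2, 1, 3]

def Spec_implementation (array : List Int) (out : Int) : Prop := out = implementation_alt array
instance (array : List Int) (out : Int) : Decidable (Spec_implementation array out) := by unfold Spec_implementation; infer_instance

-- ===== CLAIM (what is proved, stated in full; the proofs are below) =====
def Claim_equal_implementation : Prop := ∀ (array : List Int), Dom_implementation array → Pre_implementation array → Spec_implementation array (implementation array)

-- ===== LEMMAS AND PROOFS =====

-- count of split points j' ∈ [j, n): split at 0 (empty prefix) always counts;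
-- split at j' ≥ 1 counts iff prefix max P (j'-1) < suffix min M j'
def cnt (P M : Nat → Int) (n j : Nat) : Int :=
  if _ : j < n then
    (if j = 0 ∨ P (j - 1) < M j then 1 else 0) + cnt P M n (j + 1)
  else 0
termination_by n - j

theorem buildMax_length (m : Int) (xs : List Int) : (buildMax m xs).length = xs.length := by
  induction xs generalizing m with
  | nil => rfl
  | cons x xs ih => simp [buildMax, ih]

theorem buildMin_length (m : Int) (xs : List Int) : (buildMin m xs).length = xs.length := by
  induction xs generalizing m with
  | nil => rfl
  | cons x xs ih => simp [buildMin, ih]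

theorem buildMax_getD_zero (m : Int) (xs : List Int) (h : xs ≠ []) :
    (buildMax m xs).getD 0 0 = if xs.getD 0 0 > m then xs.getD 0 0 else m := by
  cases xs with
  | nil => simp at h
  | cons x xs => simp [buildMax]

theorem buildMin_getD_zero (m : Int) (xs : List Int) (h : xs ≠ []) :
    (buildMin m xs).getD 0 0 = if xs.getD 0 0 < m then xs.getD 0 0 else m := by
  cases xs with
  | nil => simp at h
  | cons x xs => simp [buildMin]

theorem buildMax_getD_succ (m : Int) (xs : List Int) (j : Nat) (h : j + 1 < xs.length) :
    (buildMax m xs).getD (j + 1) 0 =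
      (if xs.getD (j + 1) 0 > (buildMax m xs).getD j 0 then xs.getD (j + 1) 0
       else (buildMax m xs).getD j 0) := by
  induction xs generalizing m j with
  | nil => simp at h
  | cons x xs ih =>
    cases j with
    | zero =>
      have hxs : xs ≠ [] := by
        cases xs <;> simp_all
      simp only [buildMax, List.getD_cons_succ, List.getD_cons_zero]
      exact buildMax_getD_zero _ xs hxs
    | succ j =>
      simp only [buildMax, List.getD_cons_succ]
      exact ih _ j (by simpa using h)

theorem buildMin_getD_succ (m : Int) (xs : List Int) (j : Nat) (h : j + 1 < xs.length) :
    (buildMin m xs).getD (j + 1) 0 =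
      (if xs.getD (j + 1) 0 < (buildMin m xs).getD j 0 then xs.getD (j + 1) 0
       else (buildMin m xs).getD j 0) := by
  induction xs generalizing m j with
  | nil => simp at h
  | cons x xs ih =>
    cases j with
    | zero =>
      have hxs : xs ≠ [] := by
        cases xs <;> simp_all
      simp only [buildMin, List.getD_cons_succ, List.getD_cons_zero]
      exact buildMin_getD_zero _ xs hxs
    | succ j =>
      simp only [buildMin, List.getD_cons_succ]
      exact ih _ j (by simpa using h)

theorem getD_reverse (l : List Int) (j : Nat) (h : j < l.length) :
    l.reverse.getD j 0 = l.getD (l.length - 1 - j) 0 := by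
  rw [List.getD_eq_getElem _ _ (by simpa using h), List.getD_eq_getElem _ _ (by omega)]
  simp [List.getElem_reverse]

-- A's two-pointer loop counts exactly the split points in [j, n)
theorem loopA_cnt (Pl Ml : List Int) (n : Nat)
    (Pmono : ∀ a b : Nat, a ≤ b → b < n → Pl.getD a 0 ≤ Pl.getD b 0)
    (Mmono : ∀ a b : Nat, a ≤ b → b < n → Ml.getD a 0 ≤ Ml.getD b 0)
    (F : ∀ t : Nat, t < n → Ml.getD t 0 ≤ Pl.getD (n - 1) 0) :
    ∀ (d i j : Nat) (k : Int), (n - i) + (n - j) < d → i < n → j ≤ n →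
      (∀ i' : Nat, i' < i → ∀ t : Nat, j ≤ t → t < n → Pl.getD i' 0 < Ml.getD t 0) →
      loopA Pl Ml d n i j k = k + cnt (fun t => Pl.getD t 0) (fun t => Ml.getD t 0) n j := by
  intro d
  induction d with
  | zero => intro i j k hd hi hj _; omega
  | succ d ih =>
    intro i j k hd hi hj H
    by_cases hjn : j < n
    · rw [loopA]
      rw [if_pos ⟨hi, hjn⟩]
      by_cases hc : Pl.getD i 0 ≥ Ml.getD j 0
      · rw [if_pos hc]
        have hcond : (i ≥ j) ↔ (j = 0 ∨ Pl.getD (j - 1) 0 < Ml.getD j 0) := by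
          constructor
          · intro hij
            rcases Nat.eq_zero_or_pos j with h0 | h0
            · exact Or.inl h0
            · exact Or.inr (H (j - 1) (by omega) j le_rfl hjn)
          · intro hor
            by_contra hij
            rcases hor with h0 | hlt
            · omega
            · have : Pl.getD i 0 ≤ Pl.getD (j - 1) 0 := Pmono i (j - 1) (by omega) (by omega)
              omega
        have hrec := ih i (j + 1) (if i ≥ j then k + 1 else k) (by omega) hi (by omega)
          (fun i' hi' t ht htn => H i' hi' t (by omega) htn)
        rw [hrec]
        conv_rhs => rw [cnt]
        rw [dif_pos hjn]
        by_cases hij : i ≥ j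
        · rw [if_pos hij, if_pos (hcond.mp hij)]; ring
        · rw [if_neg hij, if_neg (fun hor => hij (hcond.mpr hor))]; ring
      · rw [if_neg hc]
        replace hc : Pl.getD i 0 < Ml.getD j 0 := by omega
        have hi1 : i + 1 < n := by
          by_contra hle
          have hieq : i = n - 1 := by omega
          have := F j hjn
          rw [hieq] at hc
          omega
        exact ih (i + 1) j k (by omega) hi1 hj
          (fun i' hi' t ht htn => by
            rcases Nat.lt_succ_iff_lt_or_eq.mp hi' with h' | h'
            · exact H i' h' t ht htn
            · subst h'
              exact lt_of_lt_of_le hc (Mmono j t ht htn))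
    · have hjeq : j = n := by omega
      rw [loopA, if_neg (by omega), cnt, dif_neg (by omega)]
      ring

-- B's forward pass counts exactly the split points in [j, n)
theorem countLoop_cnt (arr Ml Pl : List Int) (n : Nat)
    (Pstep : ∀ t : Nat, t + 1 < n →
      Pl.getD (t + 1) 0 = if arr.getD (t + 1) 0 > Pl.getD t 0 then arr.getD (t + 1) 0 else Pl.getD t 0) :
    ∀ (d j : Nat) (k : Int), n - j < d → 1 ≤ j →
      countLoop arr Ml d n j (Pl.getD (j - 1) 0) k =
        k + cnt (fun t => Pl.getD t 0) (fun t => Ml.getD t 0) n j := by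
  intro d
  induction d with
  | zero => intro j k hd hj; omega
  | succ d ih =>
    intro j k hd hj
    by_cases hjn : j < n
    · rw [countLoop, if_pos hjn]
      conv_rhs => rw [cnt]
      rw [dif_pos hjn]
      have hP : (if arr.getD j 0 > Pl.getD (j - 1) 0 then arr.getD j 0 else Pl.getD (j - 1) 0)
          = Pl.getD ((j + 1) - 1) 0 := by
        have := Pstep (j - 1) (by omega)
        simp only [Nat.add_sub_cancel]
        rw [show j - 1 + 1 = j from by omega] at this
        omega
      rw [hP]
      rw [ih (j + 1) _ (by omega) (by omega)]
      by_cases hlt : Pl.getD (j - 1) 0 < Ml.getD j 0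
      · rw [if_pos hlt, if_pos (Or.inr hlt)]; ring
      · rw [if_neg hlt, if_neg (by rintro (h | h) <;> omega)]; ring
    · rw [countLoop, if_neg (by omega), cnt, dif_neg (by omega)]
      ring

theorem monoStep (f : Nat → Int) (n : Nat) (step : ∀ t : Nat, t + 1 < n → f t ≤ f (t + 1)) :
    ∀ a b : Nat, a ≤ b → b < n → f a ≤ f b := by
  intro a b hab hb
  induction b with
  | zero =>
    have h0 : a = 0 := by omega
    simp [h0]
  | succ b ihb =>
    rcases Nat.eq_or_lt_of_le hab with h | h
    · rw [h]
    · exact le_trans (ihb (by omega) (by omega)) (step b hb)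

theorem main_eq (x : Int) (xs : List Int) :
    implementation (x :: xs) = implementation_alt (x :: xs) := by
  have hne : (x :: xs : List Int) ≠ [] := by simp
  have hrne : (x :: xs : List Int).reverse ≠ [] := by simp
  set n := (x :: xs : List Int).length with hn_def
  have hn : 0 < n := by simp [hn_def]
  have hrlen : (x :: xs : List Int).reverse.length = n := by simp [hn_def]
  have hm0 : (PySem.List.pyGet? (x :: xs) 0).getD 0 = x := by
    simp
  have hlast : (PySem.List.pyGet? (x :: xs) (-1)).getD 0 = (x :: xs).getD (n - 1) 0 := by
    rw [PySem.List.pyGet?_neg_one, List.getLast?_eq_getElem?, List.getD_eq_getElem?_getD]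
  set Pl := buildMax ((PySem.List.pyGet? (x :: xs) 0).getD 0) (x :: xs) with hPl_def
  set Bl := buildMin ((PySem.List.pyGet? (x :: xs) (-1)).getD 0) (x :: xs).reverse with hBl_def
  set Ml := Bl.reverse with hMl_def
  have hPlen : Pl.length = n := by rw [hPl_def, buildMax_length]
  have hBlen : Bl.length = n := by rw [hBl_def, buildMin_length, hrlen]
  have hMlen : Ml.length = n := by rw [hMl_def, List.length_reverse, hBlen]
  -- prefix-max facts
  have P0 : Pl.getD 0 0 = x := by
    rw [hPl_def, buildMax_getD_zero _ _ hne, hm0]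
    simp
  have Pstep : ∀ t : Nat, t + 1 < n →
      Pl.getD (t + 1) 0 =
        if (x :: xs).getD (t + 1) 0 > Pl.getD t 0 then (x :: xs).getD (t + 1) 0
        else Pl.getD t 0 := by
    intro t ht
    exact buildMax_getD_succ _ _ t (by omega)
  have Pmono : ∀ a b : Nat, a ≤ b → b < n → Pl.getD a 0 ≤ Pl.getD b 0 := by
    refine monoStep _ n (fun t ht => ?_)
    rw [Pstep t ht]
    split <;> omega
  have PgeArr : ∀ t : Nat, t < n → (x :: xs).getD t 0 ≤ Pl.getD t 0 := by
    intro t ht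
    cases t with
    | zero =>
      rw [P0]
      simp
    | succ t =>
      rw [Pstep t ht]
      split <;> omega
  -- suffix-min facts (Bl is the reversed scan; Ml = Bl.reverse)
  have N0 : Bl.getD 0 0 = (x :: xs).reverse.getD 0 0 := by
    have hys : (x :: xs).reverse.getD 0 0 = (x :: xs).getD (n - 1) 0 := by
      rw [getD_reverse _ _ (by omega)]
      simp [hn_def]
    rw [hBl_def, buildMin_getD_zero _ _ hrne, hlast, hys]
    simp
  have Nstep : ∀ t : Nat, t + 1 < n →
      Bl.getD (t + 1) 0 =
        if (x :: xs).reverse.getD (t + 1) 0 < Bl.getD t 0 then (x :: xs).reverse.getD (t + 1) 0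
        else Bl.getD t 0 := by
    intro t ht
    exact buildMin_getD_succ _ _ t (by omega)
  have Ndec : ∀ a b : Nat, a ≤ b → b < n → Bl.getD b 0 ≤ Bl.getD a 0 := by
    intro a b hab hb
    have h2 : -(Bl.getD a 0) ≤ -(Bl.getD b 0) :=
      monoStep (fun t => -(Bl.getD t 0)) n
        (fun t ht => by
          show -(Bl.getD t 0) ≤ -(Bl.getD (t + 1) 0)
          rw [Nstep t ht]
          split <;> omega) a b hab hb
    omega
  have NleYs : ∀ t : Nat, t < n → Bl.getD t 0 ≤ (x :: xs).reverse.getD t 0 := by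
    intro t ht
    cases t with
    | zero => exact le_of_eq N0
    | succ t =>
      rw [Nstep t ht]
      split <;> omega
  have hMget : ∀ j : Nat, j < n → Ml.getD j 0 = Bl.getD (n - 1 - j) 0 := by
    intro j hj
    rw [hMl_def, getD_reverse _ _ (by omega), hBlen]
  have Mmono : ∀ a b : Nat, a ≤ b → b < n → Ml.getD a 0 ≤ Ml.getD b 0 := by
    intro a b hab hb
    rw [hMget a (by omega), hMget b hb]
    exact Ndec (n - 1 - b) (n - 1 - a) (by omega) (by omega)
  have MleArr : ∀ t : Nat, t < n → Ml.getD t 0 ≤ (x :: xs).getD t 0 := by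
    intro t ht
    rw [hMget t ht]
    have h1 := NleYs (n - 1 - t) (by omega)
    have h2 : (x :: xs).reverse.getD (n - 1 - t) 0 = (x :: xs).getD t 0 := by
      rw [getD_reverse _ _ (by omega)]
      congr 1
      omega
    omega
  have F : ∀ t : Nat, t < n → Ml.getD t 0 ≤ Pl.getD (n - 1) 0 := by
    intro t ht
    have := MleArr t ht
    have := PgeArr t ht
    have := Pmono t (n - 1) (by omega) (by omega)
    omega
  -- assemble
  have hAeq : implementation (x :: xs) = loopA Pl Ml (n + n + 1) n 0 0 0 := rfl
  have hBeq : implementation_alt (x :: xs) =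
      countLoop (x :: xs) Ml n n 1 ((PySem.List.pyGet? (x :: xs) 0).getD 0) 1 := rfl
  rw [hAeq, hBeq, hm0]
  rw [loopA_cnt Pl Ml n Pmono Mmono F (n + n + 1) 0 0 0 (by omega) hn (by omega)
    (fun i' hi' => absurd hi' (Nat.not_lt_zero _))]
  have hCL := countLoop_cnt (x :: xs) Ml Pl n Pstep n 1 1 (by omega) le_rfl
  rw [(by norm_num : (1 : Nat) - 1 = 0), P0] at hCL
  rw [hCL]
  rw [cnt, dif_pos hn, if_pos (Or.inl rfl)]
  ring

-- ===== VERDICT (by name: the statement is the Claim_ definition above) =====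
theorem implementation_spec : Claim_equal_implementation := by
  intro array _ hpre
  unfold Spec_implementation
  cases array with
  | nil => exact absurd rfl hpre
  | cons x xs => exact main_eq x xs
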